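-- pv_equiv track=rewrite | github.com/Cuenken/advent-of-code-25 | day_2/second.py | get_invalid_ids_from_interval
-- ===== SOURCE A (Python) =====
-- def get_invalid_ids_from_interval(interval: list[int]) -> list[int]:
--     invalid_ids = []
--     for number in interval:
--
--         possible_segments = get_possible_segments(number_length := len(number_str := str(number)))
--
--         # Test of each segment case
--         for segment in possible_segments:
--             previous_segment = None
--             ko = None
--             for i in range(0, number_length, segment):
--                 if previous_segment is None:  # first iteration
--                     previous_segment = number_str[i: i+segment]
--                 if number_str[i: i+segment] != previous_segment: # not equal!
--                     ko = True
--                     break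
--                 previous_segment = number_str[i: i+segment]
--             if not ko:
--                 invalid_ids.append(number)
--                 break
--
--     return invalid_ids
--
-- def get_possible_segments(number_length: int) -> list[int]:
--     segments = []
--     for i in range(1, number_length // 2 + 1):
--         if number_length % i:
--             continue
--         segments.append(i)  # add only divisible numbers
--     return segments
-- ===== SOURCE B (Python) =====
-- def get_invalid_ids_from_interval(interval: list[int]) -> list[int]:
--     invalid_ids = []
--     for number in interval:
--         s = str(number)
--         # classic rotation/periodicity trick: s consists of a repeated shorter
--         # block iff s occurs inside (s+s) at some offset 1..len(s)-1
--         if s in (s + s)[1:-1]: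
--             invalid_ids.append(number)
--     return invalid_ids
-- ===== Notes on version B (the rewrite author's own statement) =====
-- stated objective: faster
-- what changed: A enumerates every divisor d of the digit-string length and walks the string chunk by chunk per divisor; B uses the string-rotation periodicity test 's in (s+s)[1:-1]' -- one substring search, no divisor enumeration, no chunk loops.
import Mathlib
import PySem

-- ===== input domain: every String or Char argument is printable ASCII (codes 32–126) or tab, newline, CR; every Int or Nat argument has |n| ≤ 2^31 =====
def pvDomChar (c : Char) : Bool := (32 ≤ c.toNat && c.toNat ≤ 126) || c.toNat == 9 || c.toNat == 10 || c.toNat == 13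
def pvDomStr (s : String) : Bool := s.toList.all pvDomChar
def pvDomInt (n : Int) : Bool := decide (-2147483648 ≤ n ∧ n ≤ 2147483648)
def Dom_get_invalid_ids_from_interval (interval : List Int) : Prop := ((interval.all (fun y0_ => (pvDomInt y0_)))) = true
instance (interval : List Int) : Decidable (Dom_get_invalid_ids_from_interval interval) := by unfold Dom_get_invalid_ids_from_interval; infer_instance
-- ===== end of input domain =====

-- B replaces A's divisor enumeration plus chunk-by-chunk scans by the classic
-- string-rotation periodicity test "s in (s+s)[1:-1]" — one substring search per number
-- (objective: faster, constant-factor).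

-- ===== PORT A =====
def get_possible_segments (number_length : Int) : List Int :=
  (PySem.List.pyRange 1 (PySem.Int.floordiv number_length 2 + 1) 1).foldl
    (fun segments i =>
      if PySem.Int.mod number_length i ≠ 0 then segments   -- 'if number_length % i: continue'
      else segments ++ [i]) []

-- the 'for i in range(0, number_length, segment)' loop with previous_segment / ko and break;
-- returns the final truthiness of ko (false = ko stayed None)
def pvInnerLoopA (number_str : List Char) (segment : Int) :
    List Int → Option (List Char) → Bool
  | [], _ => false
  | i :: rest, previous_segment =>
    let chunk := PySem.List.slice number_str (some i) (some (i + segment))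
    let prev := match previous_segment with
      | none => chunk                    -- first iteration: previous_segment = chunk
      | some p => p
    if chunk ≠ prev then true            -- ko = True; break
    else pvInnerLoopA number_str segment rest (some chunk)

-- the 'for segment in possible_segments' loop with its break; returns True iff number is appended
def pvSegLoopA (number_str : List Char) (number_length : Int) :
    List Int → Bool
  | [] => false
  | segment :: rest =>
    if pvInnerLoopA number_str segment (PySem.List.pyRange 0 number_length segment) none = false
    then true                            -- 'if not ko: append; break'
    else pvSegLoopA number_str number_length rest

def get_invalid_ids_from_interval (interval : List Int) : List Int :=
  interval.foldl (fun invalid_ids number =>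
    let number_str := PySem.Int.toChars number
    let number_length : Int := (number_str.length : Int)
    if pvSegLoopA number_str number_length (get_possible_segments number_length)
    then invalid_ids ++ [number] else invalid_ids) []

-- ===== PORT B =====
def get_invalid_ids_from_interval_alt (interval : List Int) : List Int :=
  interval.foldl (fun invalid_ids number =>
    let s := PySem.Int.toChars number
    if PySem.Chars.isIn s (PySem.List.slice (s ++ s) (some 1) (some (-1)))   -- s in (s+s)[1:-1]
    then invalid_ids ++ [number] else invalid_ids) []

-- ===== PRECONDITION & SPEC =====
def Spec_get_invalid_ids_from_interval (interval : List Int) (out : List Int) : Prop := out = get_invalid_ids_from_interval_alt interval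
instance (interval : List Int) (out : List Int) : Decidable (Spec_get_invalid_ids_from_interval interval out) := by unfold Spec_get_invalid_ids_from_interval; infer_instance

-- ===== CLAIM (what is proved, stated in full; the proofs are below) =====
def Claim_equal_get_invalid_ids_from_interval : Prop := ∀ (interval : List Int), Dom_get_invalid_ids_from_interval interval → Spec_get_invalid_ids_from_interval interval (get_invalid_ids_from_interval interval)

-- ===== LEMMAS AND PROOFS =====

-- str(n) is never empty
theorem pv_toDigitsCore_ne_nil (b : ℕ) :
    ∀ (f n : ℕ) (l : List Char), l ≠ [] → Nat.toDigitsCore b f n l ≠ [] := by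
  intro f
  induction f with
  | zero => intro n l h; simpa [Nat.toDigitsCore] using h
  | succ f ih =>
    intro n l h
    simp only [Nat.toDigitsCore]
    split
    · simp
    · exact ih _ _ (by simp)

theorem pv_toChars_ne_nil (n : Int) : PySem.Int.toChars n ≠ [] := by
  unfold PySem.Int.toChars
  split
  · simp
  · unfold Nat.toDigits
    simp only [Nat.toDigitsCore]
    split
    · simp
    · exact pv_toDigitsCore_ne_nil 10 _ _ _ (by simp)

-- A's helper builds exactly the divisors ≤ n//2
theorem pv_gps_eq (n : Int) :
    get_possible_segments n =
      (PySem.List.pyRange 1 (PySem.Int.floordiv n 2 + 1) 1).filter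
        (fun i => PySem.Int.mod n i == 0) := by
  unfold get_possible_segments
  have h1 := PySem.List.foldl_congr_mem
    (PySem.List.pyRange 1 (PySem.Int.floordiv n 2 + 1) 1)
    (fun segments i => if PySem.Int.mod n i ≠ 0 then segments else segments ++ [i])
    (fun segments i => if (PySem.Int.mod n i == 0) then segments ++ [i] else segments)
    ([] : List Int)
    (by intro acc x _; by_cases h : PySem.Int.mod n x = 0 <;> simp [h])
  rw [h1, PySem.List.foldl_append_if_eq_filter]
  simp

-- A's segment loop is an existence test over the segments
theorem pv_segLoop_any (s : List Char) (n : Int) (segs : List Int) :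
    pvSegLoopA s n segs =
      segs.any (fun seg => !(pvInnerLoopA s seg (PySem.List.pyRange 0 n seg) none)) := by
  induction segs with
  | nil => rfl
  | cons a t ih =>
    unfold pvSegLoopA
    cases h : pvInnerLoopA s a (PySem.List.pyRange 0 n a) none <;> simp [h, ih]

-- chain invariant of the inner loop, previous segment known
theorem pv_inner_some (s : List Char) (seg : Int) (idxs : List Int) (p : List Char) :
    pvInnerLoopA s seg idxs (some p) = false ↔
      ∀ i ∈ idxs, PySem.List.slice s (some i) (some (i + seg)) = p := by
  induction idxs generalizing p with
  | nil => simp [pvInnerLoopA]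
  | cons i t ih =>
    by_cases h : PySem.List.slice s (some i) (some (i + seg)) = p
    · simp [pvInnerLoopA, h, ih]
    · simp [pvInnerLoopA, h]

theorem pv_inner_none (s : List Char) (seg : Int) (i : Int) (idxs : List Int) :
    pvInnerLoopA s seg (i :: idxs) none = false ↔
      ∀ j ∈ idxs, PySem.List.slice s (some j) (some (j + seg)) =
        PySem.List.slice s (some i) (some (i + seg)) := by
  simp [pvInnerLoopA, pv_inner_some]

-- range(0, m*d, d) enumerated
theorem pv_pyRange_mul (dn m : Nat) (hd : 0 < dn) (hm : 0 < m) :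
    PySem.List.pyRange 0 ((m * dn : Nat) : Int) (dn : Int) =
      (List.range m).map (fun k => ((k * dn : Nat) : Int)) := by
  have hd' : (0 : Int) < (dn : Int) := by exact_mod_cast hd
  rw [PySem.List.pyRange_of_pos _ _ hd']
  have hlt : (0 : Int) < ((m * dn : Nat) : Int) := by positivity
  rw [if_pos hlt]
  have e1 : ((m * dn : Nat) : Int) - 0 + (dn : Int) - 1 = ((dn : Int) - 1) + (m : Int) * (dn : Int) := by
    push_cast; ring
  have e2 : (((dn : Int) - 1) + (m : Int) * (dn : Int)) / (dn : Int) = (m : Int) := by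
    rw [Int.add_mul_ediv_right _ _ (by omega), Int.ediv_eq_zero_of_lt (by omega) (by omega)]
    ring
  rw [e1, e2]
  simp only [Int.toNat_natCast]
  refine List.map_congr_left ?_
  intro k _
  push_cast
  ring

theorem pv_drop_flatten_replicate {c : List Char} {dn : Nat} (hc : c.length = dn) :
    ∀ (m k : Nat), k ≤ m →
      ((List.replicate m c).flatten).drop (k * dn) = (List.replicate (m - k) c).flatten := by
  intro m k
  induction k generalizing m with
  | zero => simp
  | succ k ih =>
    intro hk
    cases m with
    | zero => omega
    | succ m' =>
      rw [List.replicate_succ, List.flatten_cons]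
      have e1 : (k + 1) * dn = c.length + k * dn := by rw [hc]; ring
      rw [e1, List.drop_length_add_append, ih m' (by omega)]
      have e2 : m' + 1 - (k + 1) = m' - k := by omega
      rw [e2]

-- all d-chunks equal the first one iff s is that chunk repeated
theorem pv_chain_iff (dn : Nat) :
    ∀ (m : Nat) (s : List Char), s.length = m * dn →
      ((∀ k < m, (s.drop (k * dn)).take dn = s.take dn) ↔
        s = (List.replicate m (s.take dn)).flatten) := by
  intro m
  induction m with
  | zero =>
    intro s hs
    have : s = [] := List.eq_nil_of_length_eq_zero (by omega)
    simp [this]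
  | succ m' ih =>
    intro s hs
    constructor
    · intro h
      rcases Nat.eq_zero_or_pos m' with hm0 | hm1
      · subst hm0
        have : s.take dn = s := List.take_of_length_le (by omega)
        simp [this]
      · have hdnle : dn ≤ s.length := by nlinarith
        have hs' : s.length = m' * dn + dn := by rw [hs]; ring
        have htlen : (s.drop dn).length = m' * dn := by
          rw [List.length_drop]; omega
        have htake1 : (s.drop dn).take dn = s.take dn := by
          have h1 := h 1 (by omega)
          simpa using h1
        have ht : ∀ k < m', ((s.drop dn).drop (k * dn)).take dn = (s.drop dn).take dn := by
          intro k hk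
          rw [List.drop_drop, htake1]
          have := h (k + 1) (by omega)
          have e : dn + k * dn = (k + 1) * dn := by ring
          rw [e]
          exact this
        have := (ih (s.drop dn) htlen).mp ht
        rw [htake1] at this
        conv_lhs => rw [← List.take_append_drop dn s]
        rw [List.replicate_succ, List.flatten_cons, ← this]
    · intro h k hk
      have hm1 : 0 < m' + 1 := by omega
      have hclen : (s.take dn).length = dn := by
        rw [List.length_take]
        have : dn ≤ s.length := by nlinarith
        omega
      conv_lhs => rw [h]
      rw [pv_drop_flatten_replicate hclen (m' + 1) k (by omega)]
      have : m' + 1 - k = (m' - k) + 1 := by omega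
      rw [this, List.replicate_succ, List.flatten_cons, List.take_left' hclen]

-- the inner chunk loop over range(0, n, d) succeeds iff s is its d-prefix repeated
theorem pv_inner_iff (s : List Char) (dn m' : Nat) (hm : s.length = (m' + 1) * dn) :
    (pvInnerLoopA s (dn : Int) ((List.range (m' + 1)).map (fun k => ((k * dn : Nat) : Int))) none = false)
      ↔ s = (List.replicate (m' + 1) (s.take dn)).flatten := by
  rw [List.range_succ_eq_map, List.map_cons, pv_inner_none]
  simp only [List.map_map, List.forall_mem_map, Function.comp,
    PySem.List.slice_natCast_add, Nat.zero_mul, List.drop_zero, List.mem_range]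
  rw [← pv_chain_iff dn (m' + 1) s hm]
  constructor
  · intro h k hk
    cases k with
    | zero => simp
    | succ k' => exact h k' (by omega)
  · intro h k hk
    have := h (k + 1) (by omega)
    simpa using this

-- A's decision, characterized: some divisor length dn with at least two chunks tiles s
theorem pv_A_iff (s : List Char) :
    (pvSegLoopA s (s.length : Int) (get_possible_segments (s.length : Int)) = true) ↔
    ∃ dn m' : ℕ, 0 < dn ∧ 2 * dn ≤ s.length ∧ s.length = (m' + 1) * dn ∧
      s = (List.replicate (m' + 1) (s.take dn)).flatten := by
  rw [pv_segLoop_any, pv_gps_eq, List.any_eq_true]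
  have hfd : PySem.Int.floordiv (s.length : Int) 2 = (s.length : Int) / 2 :=
    PySem.Int.floordiv_eq_ediv_of_pos (by norm_num)
  constructor
  · rintro ⟨d, hd, hinner⟩
    rw [List.mem_filter] at hd
    obtain ⟨hdr, hdp⟩ := hd
    rw [PySem.List.mem_pyRange_one] at hdr
    have hdvd : d ∣ (s.length : Int) := (PySem.Int.mod_eq_zero_iff_dvd _ _).mp (by simpa using hdp)
    have hd1 : (1 : Int) ≤ d := hdr.1
    have hd2 : d < (s.length : Int) / 2 + 1 := by rw [hfd] at hdr; exact hdr.2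
    obtain ⟨dn, rfl⟩ : ∃ dn : Nat, d = (dn : Int) := ⟨d.toNat, (Int.toNat_of_nonneg (by omega)).symm⟩
    have hdn : 0 < dn := by exact_mod_cast hd1
    have hdvd' : dn ∣ s.length := Int.natCast_dvd_natCast.mp hdvd
    obtain ⟨mm, hmm⟩ := hdvd'
    have h2dn : 2 * dn ≤ s.length := by omega
    have hmpos : 0 < mm := by
      rcases Nat.eq_zero_or_pos mm with h0 | h1
      · subst h0; rw [Nat.mul_zero] at hmm; omega
      · exact h1
    obtain ⟨m', rfl⟩ : ∃ m', mm = m' + 1 := ⟨mm - 1, by omega⟩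
    have hlen : s.length = (m' + 1) * dn := by rw [hmm]; ring
    refine ⟨dn, m', hdn, h2dn, hlen, ?_⟩
    rw [hlen] at hinner
    rw [pv_pyRange_mul dn (m' + 1) hdn (by omega)] at hinner
    simp only [Bool.not_eq_true'] at hinner
    exact (pv_inner_iff s dn m' hlen).mp hinner
  · rintro ⟨dn, m', hdn, h2dn, hlen, hrep⟩
    refine ⟨(dn : Int), ?_, ?_⟩
    · rw [List.mem_filter, PySem.List.mem_pyRange_one, hfd]
      refine ⟨⟨by exact_mod_cast hdn, by clear hrep hlen; omega⟩, ?_⟩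
      simp only [beq_iff_eq]
      exact (PySem.Int.mod_eq_zero_iff_dvd _ _).mpr (Int.natCast_dvd_natCast.mpr ⟨m' + 1, by rw [hlen]; ring⟩)
    · rw [hlen, pv_pyRange_mul dn (m' + 1) hdn (by omega)]
      simp only [Bool.not_eq_true']
      exact (pv_inner_iff s dn m' hlen).mpr hrep

-- (s+s)[1:-1] computed
theorem pv_mid_eq (s : List Char) (h : 0 < s.length) :
    PySem.List.slice (s ++ s) (some 1) (some (-1)) =
      ((s ++ s).drop 1).take (2 * s.length - 2) := by
  simp only [PySem.List.slice, PySem.List.clampIdx, List.length_append, Int.toNat_one]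
  split_ifs with h1 h2 h3 h4 <;>
    first
      | (exfalso; omega)
      | (rw [show min 1 (s.length + s.length) = 1 from by omega]
         congr 1
         omega)

-- B's decision: s occurs in (s+s)[1:-1] iff some proper rotation of s is s itself
theorem pv_B_iff (s : List Char) (hl : 0 < s.length) :
    (PySem.Chars.isIn s (PySem.List.slice (s ++ s) (some 1) (some (-1))) = true) ↔
    ∃ p : ℕ, 1 ≤ p ∧ p + 1 ≤ s.length ∧ s.rotate p = s := by
  rw [pv_mid_eq s hl, ← PySem.Chars.exists_prefix_drop_iff_isIn]
  constructor
  · rintro ⟨j, hpre⟩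
    have hjlen : s.length ≤ ((((s ++ s).drop 1).take (2 * s.length - 2)).drop j).length :=
      hpre.length_le
    rw [List.length_drop, List.length_take, List.length_drop, List.length_append] at hjlen
    have hj : j + 2 ≤ s.length := by omega
    have heq := List.prefix_iff_eq_take.mp hpre
    rw [List.drop_take, List.drop_drop, List.take_take,
        show min s.length (2 * s.length - 2 - j) = s.length from by omega,
        show 1 + j = j + 1 from by omega, List.drop_append,
        show j + 1 - s.length = 0 from by omega, List.drop_zero,
        List.take_append, List.take_of_length_le (by rw [List.length_drop]; omega),
        List.length_drop, show s.length - (s.length - (j + 1)) = j + 1 from by omega] at heq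
    refine ⟨j + 1, by omega, by omega, ?_⟩
    rw [List.rotate_eq_drop_append_take (by omega)]
    exact heq.symm
  · rintro ⟨p, hp1, hpn, hrot⟩
    refine ⟨p - 1, List.prefix_iff_eq_take.mpr ?_⟩
    rw [List.drop_take, List.drop_drop, List.take_take,
        show min s.length (2 * s.length - 2 - (p - 1)) = s.length from by omega,
        show 1 + (p - 1) = p from by omega, List.drop_append,
        show p - s.length = 0 from by omega, List.drop_zero,
        List.take_append, List.take_of_length_le (by rw [List.length_drop]; omega),
        List.length_drop, show s.length - (s.length - p) = p from by omega,
        ← List.rotate_eq_drop_append_take (by omega)]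
    exact hrot.symm

-- rotating a repetition by the block length fixes it
theorem pv_repeat_rotate (t : List Char) (m : ℕ) :
    ((List.replicate (m + 1) t).flatten).rotate t.length = (List.replicate (m + 1) t).flatten := by
  rw [List.replicate_succ, List.flatten_cons,
      List.rotate_eq_drop_append_take (by simp),
      List.drop_left, List.take_left]
  calc (List.replicate m t).flatten ++ t
      = (List.replicate m t ++ [t]).flatten := by rw [List.flatten_append]; simp
    _ = (List.replicate (m + 1) t).flatten := by rw [← List.replicate_succ']
    _ = t ++ (List.replicate m t).flatten := by rw [List.replicate_succ, List.flatten_cons]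

theorem pv_rotate_pow (l : List Char) (p : ℕ) (h : l.rotate p = l) :
    ∀ a : ℕ, l.rotate (a * p) = l := by
  intro a
  induction a with
  | zero => simp
  | succ a ih =>
    rw [show (a + 1) * p = a * p + p from by ring, ← List.rotate_rotate, ih, h]

theorem pv_exists_mul_mod (p n : ℕ) (hn : 0 < n) :
    ∃ a : ℕ, (a * p) % n = (Nat.gcd p n) % n := by
  have hnz : ((n : ℤ)) ≠ 0 := by exact_mod_cast hn.ne'
  refine ⟨((Nat.gcdA p n) % (n : ℤ)).toNat, ?_⟩
  have ha : ((((Nat.gcdA p n) % (n : ℤ)).toNat : ℤ)) = (Nat.gcdA p n) % (n : ℤ) :=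
    Int.toNat_of_nonneg (Int.emod_nonneg _ hnz)
  have key : ((((Nat.gcdA p n) % (n : ℤ)).toNat * p : ℕ) : ℤ) % (n : ℤ) =
      ((Nat.gcd p n : ℕ) : ℤ) % (n : ℤ) := by
    push_cast
    rw [ha]
    calc ((Nat.gcdA p n) % (n : ℤ) * (p : ℤ)) % (n : ℤ)
        = ((Nat.gcdA p n) * (p : ℤ)) % (n : ℤ) := by
          rw [Int.mul_emod, Int.emod_emod_of_dvd _ dvd_rfl, ← Int.mul_emod]
      _ = ((p : ℤ) * (Nat.gcdA p n) + (n : ℤ) * (Nat.gcdB p n)) % (n : ℤ) := by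
          rw [mul_comm, Int.add_mul_emod_self_left]
      _ = ((Nat.gcd p n : ℕ) : ℤ) % (n : ℤ) := by rw [← Nat.gcd_eq_gcd_ab p n]
  exact_mod_cast key

theorem pv_rotate_gcd (l : List Char) (p : ℕ) (hl : 0 < l.length) (h : l.rotate p = l) :
    l.rotate (Nat.gcd p l.length) = l := by
  obtain ⟨a, ha⟩ := pv_exists_mul_mod p l.length hl
  rw [← List.rotate_mod, ← ha, List.rotate_mod]
  exact pv_rotate_pow l p h a

-- one period step on chunks
theorem pv_chunk_step (s : List Char) (g j : ℕ)
    (hdg : s.drop g = s.take (s.length - g)) (hj : j + g + g ≤ s.length) :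
    (s.drop (j + g)).take g = (s.drop j).take g := by
  rw [show j + g = g + j from by ring, ← List.drop_drop, hdg, List.drop_take, List.take_take,
      show min g (s.length - g - j) = g from by omega]

theorem pv_period_chunks (s : List Char) (g : ℕ) (hg : g ≤ s.length)
    (hrot : s.rotate g = s) :
    ∀ k, k * g + g ≤ s.length → (s.drop (k * g)).take g = s.take g := by
  have heq : s.drop g ++ s.take g = s := by
    rw [← List.rotate_eq_drop_append_take hg]; exact hrot
  have hdg : s.drop g = s.take (s.length - g) := by
    have h2 := congrArg (List.take (s.length - g)) heq
    rwa [List.take_left' (by rw [List.length_drop])] at h2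
  intro k
  induction k with
  | zero => intro _; simp
  | succ k ih =>
    intro hk
    have hk' : k * g + g + g ≤ s.length := by
      have : (k + 1) * g = k * g + g := by ring
      omega
    rw [show (k + 1) * g = k * g + g from by ring,
        pv_chunk_step s g (k * g) hdg hk', ih (by omega)]

-- per-number: A's decision equals B's decision
theorem pv_point (s : List Char) (hs : s ≠ []) :
    pvSegLoopA s (s.length : Int) (get_possible_segments (s.length : Int)) =
      PySem.Chars.isIn s (PySem.List.slice (s ++ s) (some 1) (some (-1))) := by
  have hl : 0 < s.length := List.length_pos_iff.mpr hs
  rw [Bool.eq_iff_iff, pv_A_iff, pv_B_iff s hl]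
  constructor
  · rintro ⟨dn, m', hdn, h2dn, hlen, hrep⟩
    set t := s.take dn with htdef
    have ht : t.length = dn := by rw [htdef, List.length_take]; omega
    refine ⟨dn, by omega, by omega, ?_⟩
    conv_lhs => rw [hrep]
    rw [← ht, pv_repeat_rotate, ← hrep]
  · rintro ⟨p, hp1, hpn, hrot⟩
    set g := Nat.gcd p s.length with hgdef
    have hrotg : s.rotate g = s := pv_rotate_gcd s p hl hrot
    have hgpos : 0 < g := Nat.gcd_pos_of_pos_left _ (by omega)
    have hgdvd : g ∣ s.length := Nat.gcd_dvd_right _ _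
    have hgp : g ≤ p := Nat.gcd_le_left _ (by omega)
    obtain ⟨mm, hmm⟩ := hgdvd
    have hmm2 : 2 ≤ mm := by
      rcases Nat.lt_or_ge mm 2 with hlt | hge
      · interval_cases mm <;> omega
      · exact hge
    have hlen : s.length = mm * g := by rw [hmm]; ring
    have h2g : 2 * g ≤ s.length := by
      calc 2 * g ≤ mm * g := Nat.mul_le_mul_right g hmm2
        _ = s.length := hlen.symm
    have hchunks : ∀ k < mm, (s.drop (k * g)).take g = s.take g := by
      intro k hk
      refine pv_period_chunks s g (by omega) hrotg k ?_
      have : (k + 1) * g ≤ mm * g := Nat.mul_le_mul_right g (by omega)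
      calc k * g + g = (k + 1) * g := by ring
        _ ≤ mm * g := this
        _ = s.length := hlen.symm
    obtain ⟨m', rfl⟩ : ∃ m', mm = m' + 1 := ⟨mm - 1, by omega⟩
    refine ⟨g, m', hgpos, h2g, hlen, ?_⟩
    exact (pv_chain_iff g (m' + 1) s hlen).mp hchunks

theorem pv_main (interval : List Int) :
    get_invalid_ids_from_interval interval = get_invalid_ids_from_interval_alt interval := by
  unfold get_invalid_ids_from_interval get_invalid_ids_from_interval_alt
  refine PySem.List.foldl_congr_mem _ _ _ _ ?_
  intro acc x _
  dsimp only []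
  rw [pv_point _ (pv_toChars_ne_nil x)]

-- ===== VERDICT (by name: the statement is the Claim_ definition above) =====
theorem get_invalid_ids_from_interval_spec : Claim_equal_get_invalid_ids_from_interval := by
  intro interval _
  unfold Spec_get_invalid_ids_from_interval
  exact pv_main interval
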